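-- pv_equiv track=rewrite | github.com/tatendakutadza/100daysofcode | day_4-hangman_game.py | display_user_progress
-- ===== SOURCE A (Python) =====
-- def display_user_progress(country_name, user_progress, guessed_letter):
--     updated_user_progress = []
--
--     for index_ in range(len(country_name)):
--         if country_name[index_].isalpha() and country_name[index_] == guessed_letter \
--                 and user_progress[index_] != "*":
--             user_progress[index_] = "*"
--             break
--
--     for index_ in range(len(country_name)):
--         if country_name[index_].isalpha() and user_progress[index_] == "_ ":
--             updated_user_progress.append("_ ")
--         elif country_name[index_].isalpha() and user_progress[index_] == "*":
--             updated_user_progress.append(country_name[index_])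
--         else:
--             updated_user_progress.append(country_name[index_])
--     return [user_progress, updated_user_progress]
-- ===== SOURCE B (Python) =====
-- def display_user_progress(country_name, user_progress, guessed_letter):
--     # Single fused pass over zip(country_name, user_progress) with a `marked` flag:
--     # marks the first eligible cell and builds the display row in the same traversal.
--     # Like A, mutates user_progress in place (via slice assignment).
--     marked = False
--     new_prog = []
--     row = []
--     for c, p in zip(country_name, user_progress):
--         if not marked and c.isalpha() and c == guessed_letter and p != "*":
--             p = "*"
--             marked = True
--         new_prog.append(p)
--         row.append("_ " if c.isalpha() and p == "_ " else c)
--     row.extend(country_name[len(new_prog):])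
--     new_prog.extend(user_progress[len(country_name):])
--     user_progress[:] = new_prog
--     return [user_progress, row]
-- ===== Notes on version B (the rewrite author's own statement) =====
-- stated objective: alternative
-- what changed: Replaces A's two index-based range(len) loops (a break-scan to mark, then a second full scan to build the display) with one fused pass over zip(country_name, user_progress) carrying a `marked` boolean, building the new progress list and the display row together without indexing, plus slice handling of the unequal-length tails.
import Mathlib
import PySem

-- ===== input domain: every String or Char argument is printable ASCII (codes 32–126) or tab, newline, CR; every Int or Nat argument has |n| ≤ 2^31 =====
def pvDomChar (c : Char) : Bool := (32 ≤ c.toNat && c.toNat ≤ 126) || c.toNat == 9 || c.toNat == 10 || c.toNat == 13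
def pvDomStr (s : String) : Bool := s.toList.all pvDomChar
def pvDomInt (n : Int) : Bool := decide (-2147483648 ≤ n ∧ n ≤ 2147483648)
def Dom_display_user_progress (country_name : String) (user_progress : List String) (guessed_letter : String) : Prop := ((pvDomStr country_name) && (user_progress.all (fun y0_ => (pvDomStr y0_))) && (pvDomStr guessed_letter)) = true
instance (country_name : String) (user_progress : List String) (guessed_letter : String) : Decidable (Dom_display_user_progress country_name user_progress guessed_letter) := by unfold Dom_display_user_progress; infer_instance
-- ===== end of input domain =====

-- B replaces A's two index-based range loops (break-scan to mark, then a full second scan)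
-- with one fused pass over zip(country_name, user_progress) carrying a `marked` flag; both
-- Pythons mutate user_progress in place the same way (the equivalence is about the return value).

-- ===== PORT A =====
-- first loop: walk indexed chars, on the first hit set user_progress[i] = "*" and break
def aMark (gl : String) (up : List String) : List Char → Nat → List String
  | [], _ => up
  | c :: rest, i =>
      if PySem.Chars.isalpha c && (String.ofList [c] == gl) && (up.getD i "" != "*")
      then up.set i "*"
      else aMark gl up rest (i + 1)

-- second loop: the three branches of A's if/elif/else, appended in order
def aRow (up2 : List String) : List Char → Nat → List String
  | [], _ => []
  | c :: rest, i =>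
      (if PySem.Chars.isalpha c && (up2.getD i "" == "_ ") then "_ "
       else if PySem.Chars.isalpha c && (up2.getD i "" == "*") then String.ofList [c]
       else String.ofList [c]) :: aRow up2 rest (i + 1)

def display_user_progress (country_name : String) (user_progress : List String) (guessed_letter : String) : List (List String) :=
  let up2 := aMark guessed_letter user_progress country_name.toList 0
  [up2, aRow up2 country_name.toList 0]

-- ===== PORT B =====
-- the fused `for c, p in zip(...)` loop: returns (new_prog, row) built in one pass
def bGo (gl : String) : List (Char × String) → Bool → (List String × List String)
  | [], _ => ([], [])
  | (c, p) :: rest, marked =>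
      let hit := !marked && PySem.Chars.isalpha c && (String.ofList [c] == gl) && (p != "*")
      let p' := if hit then "*" else p
      let r := bGo gl rest (marked || hit)
      (p' :: r.1, (if PySem.Chars.isalpha c && (p' == "_ ") then "_ " else String.ofList [c]) :: r.2)

def display_user_progress_alt (country_name : String) (user_progress : List String) (guessed_letter : String) : List (List String) :=
  let r := bGo guessed_letter (country_name.toList.zip user_progress) false
  let row := r.2 ++ (country_name.toList.drop r.1.length).map (fun c => String.ofList [c])
  let new_prog := r.1 ++ user_progress.drop country_name.toList.length
  [new_prog, row]

-- ===== PRECONDITION & SPEC =====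
-- Pre_ excludes exactly the inputs where Python A raises IndexError: an alphabetic position
-- of country_name with no corresponding entry in user_progress.
def Pre_display_user_progress (country_name : String) (user_progress : List String) (_guessed_letter : String) : Prop :=
  ∀ i < country_name.toList.length, PySem.Chars.isalpha (country_name.toList.getD i ' ') = true → i < user_progress.length
instance (country_name : String) (user_progress : List String) (guessed_letter : String) : Decidable (Pre_display_user_progress country_name user_progress guessed_letter) := by unfold Pre_display_user_progress; infer_instance
def pvWitness_display_user_progress : String × List String × String := ("ab", ["_ ", "_ "], "a")

def Spec_display_user_progress (country_name : String) (user_progress : List String) (guessed_letter : String) (out : List (List String)) : Prop := out = display_user_progress_alt country_name user_progress guessed_letter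
instance (country_name : String) (user_progress : List String) (guessed_letter : String) (out : List (List String)) : Decidable (Spec_display_user_progress country_name user_progress guessed_letter out) := by unfold Spec_display_user_progress; infer_instance

-- ===== CLAIM (what is proved, stated in full; the proofs are below) =====
def Claim_equal_display_user_progress : Prop := ∀ (country_name : String) (user_progress : List String) (guessed_letter : String), Dom_display_user_progress country_name user_progress guessed_letter → Pre_display_user_progress country_name user_progress guessed_letter → Spec_display_user_progress country_name user_progress guessed_letter (display_user_progress country_name user_progress guessed_letter)

-- ===== LEMMAS AND PROOFS =====

-- shift lemmas: indexed loops over (p :: ps) at i+1 are the same loops over ps at i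
theorem aMark_shift (gl p : String) (ps : List String) (l : List Char) (i : Nat) :
    aMark gl (p :: ps) l (i + 1) = p :: aMark gl ps l i := by
  induction l generalizing i with
  | nil => simp [aMark]
  | cons c rest ih =>
      simp only [aMark, List.getD_cons_succ, List.set_cons_succ]
      split_ifs with h <;> simp_all

theorem aMark_nil_up (gl : String) (l : List Char) (i : Nat) :
    aMark gl [] l i = [] := by
  induction l generalizing i with
  | nil => simp [aMark]
  | cons c rest ih => simp only [aMark]; split_ifs <;> simp_all

theorem aRow_shift (p : String) (ps : List String) (l : List Char) (i : Nat) :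
    aRow (p :: ps) l (i + 1) = aRow ps l i := by
  induction l generalizing i with
  | nil => simp [aRow]
  | cons c rest ih => simp only [aRow, List.getD_cons_succ]; rw [ih]

theorem aRow_nil_up (l : List Char) (i : Nat) :
    aRow [] l i = l.map (fun c => String.ofList [c]) := by
  induction l generalizing i with
  | nil => simp [aRow]
  | cons c rest ih =>
      simp only [aRow, List.map_cons, List.getD_nil]
      rw [ih]
      split_ifs <;> simp_all

-- A's three-branch cell collapses to B's two-branch cell
theorem cell_collapse (c : Char) (x : String) :
    (if PySem.Chars.isalpha c && (x == "_ ") then "_ "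
     else if PySem.Chars.isalpha c && (x == "*") then String.ofList [c]
     else String.ofList [c])
    = (if PySem.Chars.isalpha c && (x == "_ ") then "_ " else String.ofList [c]) := by
  split_ifs <;> rfl

-- once marked, the fused pass copies progress cells and builds cells from the unchanged p
theorem bGo_true (gl : String) (z : List (Char × String)) :
    bGo gl z true =
      (z.map Prod.snd,
       z.map (fun q => if PySem.Chars.isalpha q.1 && (q.2 == "_ ") then "_ " else String.ofList [q.1])) := by
  induction z with
  | nil => rfl
  | cons q rest ih => obtain ⟨c, p⟩ := q; simp [bGo, ih]

theorem zip_snd_append_drop (cs : List Char) (ps : List String) :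
    (cs.zip ps).map Prod.snd ++ ps.drop cs.length = ps := by
  induction cs generalizing ps with
  | nil => simp
  | cons c cs ih => cases ps with
      | nil => simp
      | cons p ps => simp [ih]

-- A's row over a fixed up equals the marked-state fused pass plus the literal tail
theorem aRow_eq_zip (gl : String) (l : List Char) (up : List String) :
    aRow up l 0 = (bGo gl (l.zip up) true).2
      ++ (l.drop (l.zip up).length).map (fun c => String.ofList [c]) := by
  induction l generalizing up with
  | nil => simp [aRow, bGo]
  | cons c cs ih =>
      cases up with
      | nil => simp [aRow_nil_up, bGo_true]
      | cons p ps =>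
          rw [bGo_true]
          simp only [aRow, List.zip_cons_cons, List.map_cons, List.getD_cons_zero,
            List.length_cons, List.drop_succ_cons, List.cons_append]
          rw [cell_collapse, aRow_shift, ih ps, bGo_true]

-- the unmarked fused pass: new progress list agrees with A's break-scan
theorem bGo_fst (gl : String) (l : List Char) (up : List String) :
    (bGo gl (l.zip up) false).1 ++ up.drop l.length = aMark gl up l 0 := by
  induction l generalizing up with
  | nil => simp [aMark, bGo]
  | cons c cs ih =>
      cases up with
      | nil => simp [aMark_nil_up, bGo]
      | cons p ps =>
          simp only [List.zip_cons_cons, bGo, Bool.not_false, Bool.true_and, aMark,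
            List.getD_cons_zero, List.set_cons_zero, List.length_cons, List.drop_succ_cons]
          by_cases h : (PySem.Chars.isalpha c && (String.ofList [c] == gl) && (p != "*")) = true
          · simp only [h, if_true, Bool.false_or, List.cons_append]
            rw [bGo_true]
            simp [zip_snd_append_drop]
          · simp only [h, Bool.false_eq_true, if_false, List.cons_append, Bool.or_false]
            rw [aMark_shift, ih ps]

-- the unmarked fused pass: display row agrees with A's second scan over the marked progress
theorem bGo_snd (gl : String) (l : List Char) (up : List String) :
    (bGo gl (l.zip up) false).2 ++ (l.drop (l.zip up).length).map (fun c => String.ofList [c])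
      = aRow (aMark gl up l 0) l 0 := by
  induction l generalizing up with
  | nil => simp [aRow, bGo]
  | cons c cs ih =>
      cases up with
      | nil => simp [aMark_nil_up, aRow_nil_up, bGo]
      | cons p ps =>
          simp only [List.zip_cons_cons, bGo, Bool.not_false, Bool.true_and, aMark,
            List.getD_cons_zero, List.set_cons_zero, List.length_cons, List.drop_succ_cons]
          by_cases h : (PySem.Chars.isalpha c && (String.ofList [c] == gl) && (p != "*")) = true
          · simp only [h, if_true, Bool.false_or, List.cons_append]
            simp only [aRow, List.getD_cons_zero, aRow_shift]
            rw [cell_collapse, aRow_eq_zip gl cs ps]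
          · simp only [h, Bool.false_eq_true, if_false, List.cons_append, Bool.or_false]
            rw [aMark_shift]
            simp only [aRow, List.getD_cons_zero, aRow_shift]
            rw [cell_collapse, ih ps]

theorem bGo_length (gl : String) (z : List (Char × String)) (m : Bool) :
    (bGo gl z m).1.length = z.length := by
  induction z generalizing m with
  | nil => rfl
  | cons q rest ih => obtain ⟨c, p⟩ := q; simp [bGo, ih]

-- ===== VERDICT (by name: the statement is the Claim_ definition above) =====
theorem display_user_progress_spec : Claim_equal_display_user_progress := by
  intro cn up gl _ _
  unfold Spec_display_user_progress
  simp only [display_user_progress, display_user_progress_alt]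
  rw [bGo_length, List.length_zip]
  have h2 := bGo_snd gl cn.toList up
  rw [List.length_zip] at h2
  rw [bGo_fst, ← h2]
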